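-- pv_equiv track=rewrite | github.com/michele-castigliego/phonema-ng | scripts/create_frame_targets.py | build_phoneme_index
-- ===== SOURCE A (Python) =====
-- SPECIAL_TOKENS = {
--     "<SIL>": 0,
-- }
--
-- def build_phoneme_index(phonemized_data):
--     index = dict(SPECIAL_TOKENS)
--     current_id = 10  # IPA symbols start at 10
--     for sample in phonemized_data:
--         for p in sample["phonemes"]:
--             if p.startswith("<LANG:"):
--                 continue
--             if p not in index:
--                 index[p] = current_id
--                 current_id += 1
--     return index
-- ===== SOURCE B (Python) =====
-- SPECIAL_TOKENS = {
--     "<SIL>": 0,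
-- }
--
-- def build_phoneme_index(phonemized_data):
--     tokens = [p for sample in phonemized_data for p in sample["phonemes"]
--               if not p.startswith("<LANG:") and p not in SPECIAL_TOKENS]
--     # Pass 1: map each eligible token to its first position via a running min
--     # (no membership test, no counter).
--     first = {}
--     for pos, p in enumerate(tokens):
--         first[p] = min(first.get(p, pos), pos)
--     # Pass 2: order tokens by their first position and assign ids from 10.
--     ordered = [p for p, _ in sorted(first.items(), key=lambda kv: kv[1])]
--     return {**SPECIAL_TOKENS, **{p: i for i, p in enumerate(ordered, start=10)}}
-- ===== Notes on version B (the rewrite author's own statement) =====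
-- stated objective: alternative
-- what changed: Replaces A's online dedup (membership test against the growing index plus a running id counter) by a first-position hash index built with a running min and a sort-by-position pass that assigns ids via enumerate(start=10).
import Mathlib
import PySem

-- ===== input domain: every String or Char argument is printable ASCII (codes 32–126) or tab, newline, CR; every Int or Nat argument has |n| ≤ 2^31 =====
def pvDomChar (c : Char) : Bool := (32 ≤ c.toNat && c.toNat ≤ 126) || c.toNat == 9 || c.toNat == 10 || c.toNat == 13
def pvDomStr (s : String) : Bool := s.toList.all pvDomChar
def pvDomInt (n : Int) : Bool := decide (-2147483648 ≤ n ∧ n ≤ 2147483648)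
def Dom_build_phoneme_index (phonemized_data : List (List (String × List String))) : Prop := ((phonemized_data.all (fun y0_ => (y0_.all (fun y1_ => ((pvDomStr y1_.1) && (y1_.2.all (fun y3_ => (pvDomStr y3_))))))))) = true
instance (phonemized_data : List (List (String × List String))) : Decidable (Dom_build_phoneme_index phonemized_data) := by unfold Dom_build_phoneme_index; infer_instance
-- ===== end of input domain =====

-- B replaces A's online dedup (membership test + running counter) by a first-position map
-- built with a running min, then a sort-by-first-position pass assigning ids from 10.

-- ===== PORT A =====
-- module constant: SPECIAL_TOKENS = {"<SIL>": 0}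
def pvSpecialTokens : PySem.Dict String Int := PySem.Dict.ofList [("<SIL>", 0)]

def build_phoneme_index (phonemized_data : List (List (String × List String))) : List (String × Int) :=
  let st := phonemized_data.foldl (fun st sample =>
      (((PySem.Dict.mk sample).get? "phonemes").getD []).foldl (fun (st : PySem.Dict String Int × Int) p =>
        if PySem.Str.startswith p "<LANG:" then st
        else if st.1.contains p then st
        else (st.1.insert p st.2, st.2 + 1)) st)
    (pvSpecialTokens, (10 : Int))
  st.1.items

-- ===== PORT B =====
def build_phoneme_index_alt (phonemized_data : List (List (String × List String))) : List (String × Int) :=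
  let tokens := phonemized_data.flatMap (fun sample =>
    (((PySem.Dict.mk sample).get? "phonemes").getD []).filter (fun p =>
      !(PySem.Str.startswith p "<LANG:") && !(pvSpecialTokens.contains p)))
  -- pass 1: first[p] = min(first.get(p, pos), pos) over enumerate(tokens)
  let first := (PySem.List.enumerate tokens 0).foldl
      (fun (d : PySem.Dict String Int) q => d.insert q.2 (min (d.getD q.2 q.1) q.1)) PySem.Dict.empty
  -- pass 2: sorted(first.items(), key=kv[1]), keep keys, merge with SPECIAL_TOKENS, ids from 10
  let ordered := (PySem.List.sorted first.items (fun kv => kv.2)).map Prod.fst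
  ("<SIL>", (0 : Int)) :: (PySem.List.enumerate ordered 10).map (fun q => (q.2, q.1))

-- ===== PRECONDITION & SPEC =====
-- Pre_ excludes inputs where some sample lacks the "phonemes" key, on which A (and B) raise KeyError.
def Pre_build_phoneme_index (phonemized_data : List (List (String × List String))) : Prop :=
  ∀ sample ∈ phonemized_data, ((PySem.Dict.mk sample).get? "phonemes").isSome
instance (phonemized_data : List (List (String × List String))) : Decidable (Pre_build_phoneme_index phonemized_data) := by unfold Pre_build_phoneme_index; infer_instance
def pvWitness_build_phoneme_index : (List (List (String × List String))) :=
  [[("phonemes", ["a", "<SIL>", "b", "a"])], [("phonemes", ["<LANG:en>", "b", "c"])]]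

def Spec_build_phoneme_index (phonemized_data : List (List (String × List String))) (out : List (String × Int)) : Prop := out = build_phoneme_index_alt phonemized_data
instance (phonemized_data : List (List (String × List String))) (out : List (String × Int)) : Decidable (Spec_build_phoneme_index phonemized_data out) := by unfold Spec_build_phoneme_index; infer_instance

-- ===== CLAIM (what is proved, stated in full; the proofs are below) =====
def Claim_equal_build_phoneme_index : Prop := ∀ (phonemized_data : List (List (String × List String))), Dom_build_phoneme_index phonemized_data → Pre_build_phoneme_index phonemized_data → Spec_build_phoneme_index phonemized_data (build_phoneme_index phonemized_data)

-- ===== LEMMAS AND PROOFS =====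

def pvPred (p : String) : Bool :=
  !(PySem.Str.startswith p "<LANG:") && !(pvSpecialTokens.contains p)

-- ---- A side: the loop state as a function of the freshly assigned phonemes (in order) ----
def pvState (extras : List String) : PySem.Dict String Int × Int :=
  (PySem.Dict.mk (("<SIL>", (0 : Int)) :: (PySem.List.enumerate extras 10).map (fun q => (q.2, q.1))),
   10 + (extras.length : Int))

theorem pvSpecial_contains (p : String) : pvSpecialTokens.contains p = (p == "<SIL>") := by
  simp [pvSpecialTokens, PySem.Dict.ofList, PySem.Dict.update, PySem.Dict.contains_insert,
    PySem.Dict.contains_empty]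

theorem pvState_contains (extras : List String) (p : String) :
    (pvState extras).1.contains p = decide (p = "<SIL>" ∨ p ∈ extras) := by
  have hmap : (List.map (fun q : Int × String => (q.2, q.1)) (PySem.List.enumerate extras 10)).map Prod.fst = extras := by
    rw [List.map_map]; simp [Function.comp_def]
  rw [PySem.Dict.contains_eq_decide_mem_keys]
  simp only [pvState, PySem.Dict.keys_mk, List.map_cons, hmap]
  simp [List.mem_cons]

theorem pvState_snoc (extras : List String) (p : String) (hs : p ≠ "<SIL>") (hm : p ∉ extras) :
    pvState (extras ++ [p])
      = ((pvState extras).1.insert p (pvState extras).2, (pvState extras).2 + 1) := by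
  have hc : (pvState extras).1.contains p = false := by
    rw [pvState_contains]; simp [hs, hm]
  refine Prod.ext ?_ ?_
  · apply PySem.Dict.ext
    rw [PySem.Dict.items_insert_of_not_contains _ _ hc]
    simp only [pvState]
    rw [PySem.List.enumerate_append]
    simp [PySem.List.enumerate_cons, PySem.List.enumerate_nil]
  · simp only [pvState, List.length_append, List.length_cons, List.length_nil]; push_cast; ring

theorem pvState_inner (ps : List String) (extras : List String) :
    ps.foldl (fun (st : PySem.Dict String Int × Int) p =>
        if PySem.Str.startswith p "<LANG:" then st
        else if st.1.contains p then st
        else (st.1.insert p st.2, st.2 + 1)) (pvState extras)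
      = pvState (PySem.Set.update extras (ps.filter pvPred)) := by
  induction ps generalizing extras with
  | nil => simp [PySem.Set.update]
  | cons p ps ih =>
    simp only [List.foldl_cons, List.filter_cons]
    by_cases h1 : PySem.Str.startswith p "<LANG:" = true
    · have hpred : pvPred p = false := by unfold pvPred; rw [h1]; simp
      rw [if_pos h1, hpred, ih]; simp
    · rw [if_neg h1]
      by_cases hs : p = "<SIL>"
      · have hpred : pvPred p = false := by
          unfold pvPred; rw [pvSpecial_contains, hs]; simp
        have hc : (pvState extras).1.contains p = true := by
          rw [pvState_contains]; simp [hs]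
        rw [if_pos hc, hpred, ih]; simp
      · have hpred : pvPred p = true := by
          unfold pvPred
          rw [Bool.not_eq_true] at h1
          rw [pvSpecial_contains, h1]
          simp [hs]
        by_cases hm : p ∈ extras
        · have hc : (pvState extras).1.contains p = true := by
            rw [pvState_contains]; simp [hm]
          have hadd : PySem.Set.add extras p = extras := PySem.Set.add_of_mem hm
          rw [if_pos hc, hpred, ih]; simp [PySem.Set.update_cons, hadd]
        · have hc : (pvState extras).1.contains p = false := by
            rw [pvState_contains]; simp [hs, hm]
          have hadd : PySem.Set.add extras p = extras ++ [p] := PySem.Set.add_of_not_mem hm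
          rw [if_neg (by simp [hc]), ← pvState_snoc extras p hs hm, ih, hpred]
          simp [PySem.Set.update_cons, hadd]

theorem pvState_outer (data : List (List (String × List String))) (extras : List String) :
    data.foldl (fun st sample =>
      (((PySem.Dict.mk sample).get? "phonemes").getD []).foldl (fun (st : PySem.Dict String Int × Int) p =>
        if PySem.Str.startswith p "<LANG:" then st
        else if st.1.contains p then st
        else (st.1.insert p st.2, st.2 + 1)) st) (pvState extras)
      = pvState (PySem.Set.update extras (data.flatMap (fun sample =>
          (((PySem.Dict.mk sample).get? "phonemes").getD []).filter pvPred))) := by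
  induction data generalizing extras with
  | nil => simp [PySem.Set.update]
  | cons s rest ih =>
    simp only [List.foldl_cons, List.flatMap_cons]
    rw [pvState_inner, ih, PySem.Set.update_append]

-- ---- B side: the min-fold builds the first-occurrence-position table ----

-- specification of B's pass 1: entries (token, position) at first occurrences, skipping `seen`
def pvFstOcc : List (Int × String) → List String → List (String × Int)
  | [], _ => []
  | (i, p) :: qs, seen =>
      if p ∈ seen then pvFstOcc qs seen else (p, i) :: pvFstOcc qs (seen ++ [p])

theorem pvFstOcc_lb (ts : List String) (k : Int) (seen : List String) :
    ∀ r ∈ pvFstOcc (PySem.List.enumerate ts k) seen, k ≤ r.2 := by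
  induction ts generalizing k seen with
  | nil => simp [PySem.List.enumerate_nil, pvFstOcc]
  | cons t ts ih =>
    rw [PySem.List.enumerate_cons]
    intro r hr
    by_cases hm : t ∈ seen
    · rw [pvFstOcc, if_pos hm] at hr
      exact le_trans (by omega) (ih (k + 1) seen r hr)
    · rw [pvFstOcc, if_neg hm] at hr
      rcases List.mem_cons.mp hr with h | h
      · subst h; simp
      · exact le_trans (by omega) (ih (k + 1) (seen ++ [t]) r h)

theorem pvFstOcc_pairwise (ts : List String) (k : Int) (seen : List String) :
    (pvFstOcc (PySem.List.enumerate ts k) seen).Pairwise (fun a b => a.2 ≤ b.2) := by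
  induction ts generalizing k seen with
  | nil => simp [PySem.List.enumerate_nil, pvFstOcc]
  | cons t ts ih =>
    rw [PySem.List.enumerate_cons]
    by_cases hm : t ∈ seen
    · rw [pvFstOcc, if_pos hm]; exact ih (k + 1) seen
    · rw [pvFstOcc, if_neg hm]
      refine List.Pairwise.cons ?_ (ih (k + 1) (seen ++ [t]))
      intro r hr
      exact le_trans (by omega) (pvFstOcc_lb ts (k + 1) (seen ++ [t]) r hr)

theorem pvFstOcc_map_fst (ts : List String) (k : Int) (seen : List String) :
    seen ++ (pvFstOcc (PySem.List.enumerate ts k) seen).map Prod.fst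
      = PySem.Set.update seen ts := by
  induction ts generalizing k seen with
  | nil => simp [PySem.List.enumerate_nil, pvFstOcc, PySem.Set.update]
  | cons t ts ih =>
    rw [PySem.List.enumerate_cons, PySem.Set.update_cons]
    by_cases hm : t ∈ seen
    · rw [pvFstOcc, if_pos hm, PySem.Set.add_of_mem hm, ih]
    · rw [pvFstOcc, if_neg hm, PySem.Set.add_of_not_mem hm, ← ih (k + 1) (seen ++ [t])]
      simp

theorem pvMinFold (ts : List String) (k : Int) (d : PySem.Dict String Int)
    (hnd : d.keys.Nodup) (hlt : ∀ r ∈ d.items, r.2 < k) :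
    ((PySem.List.enumerate ts k).foldl
        (fun (d : PySem.Dict String Int) q => d.insert q.2 (min (d.getD q.2 q.1) q.1)) d).items
      = d.items ++ pvFstOcc (PySem.List.enumerate ts k) d.keys := by
  induction ts generalizing k d with
  | nil => simp [PySem.List.enumerate_nil, pvFstOcc]
  | cons t ts ih =>
    rw [PySem.List.enumerate_cons]
    simp only [List.foldl_cons]
    by_cases hm : t ∈ d.keys
    · -- t already recorded: min keeps the old (smaller) position, the dict is unchanged
      have hm' : ∃ v, (t, v) ∈ d.items := by
        simpa [PySem.Dict.keys, List.mem_map, Prod.ext_iff] using hm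
      obtain ⟨v, hr⟩ := hm'
      have hget : d.get? t = some v := PySem.Dict.get?_of_mem_items d hr hnd
      have hgetD : d.getD t k = v := PySem.Dict.getD_of_get?_eq_some d k hget
      have hmin : min (d.getD t k) k = v := by
        rw [hgetD]; exact min_eq_left (le_of_lt (hlt (t, v) hr))
      have hc : d.contains t = true := by
        rw [PySem.Dict.contains_eq_isSome_get?, hget]; rfl
      have hins : d.insert t (min (d.getD t k) k) = d := by
        apply PySem.Dict.ext
        rw [hmin, PySem.Dict.items_insert_of_contains d v hc]
        conv_rhs => rw [show d.items = d.items.map id from (List.map_id d.items).symm]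
        apply List.map_congr_left
        intro p hp
        by_cases hpt : p.1 = t
        · have hps : d.get? p.1 = some p.2 := PySem.Dict.get?_of_mem_items d (by simpa using hp) hnd
          rw [hpt, hget] at hps
          have hv : v = p.2 := by injection hps
          simp only [hpt, beq_self_eq_true, if_true, id_eq]
          exact Prod.ext hpt.symm hv
        · simp [hpt]

      rw [hins, ih (k + 1) d hnd (fun r hr => lt_trans (hlt r hr) (by omega)),
        pvFstOcc, if_pos hm]
    · -- fresh token: first.get(t, k) = k, min k k = k, the entry (t, k) is appended
      have hc : d.contains t = false := by
        rw [PySem.Dict.contains_eq_decide_mem_keys]; simp [hm]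
      have hgetD : d.getD t k = k := PySem.Dict.getD_of_not_contains d k hc
      have hitems : (d.insert t (min (d.getD t k) k)).items = d.items ++ [(t, k)] := by
        rw [hgetD, min_self]; exact PySem.Dict.items_insert_of_not_contains d k hc
      have hkeys : (d.insert t (min (d.getD t k) k)).keys = d.keys ++ [t] := by
        simp [PySem.Dict.keys, hitems]
      have hnd' : (d.insert t (min (d.getD t k) k)).keys.Nodup := by
        rw [hkeys]
        simp only [List.nodup_append, List.nodup_singleton, true_and]
        refine ⟨hnd, ?_⟩
        intro a ha b hb
        simp only [List.mem_singleton] at hb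
        subst hb
        exact fun h => hm (h ▸ ha)
      have hlt' : ∀ r ∈ (d.insert t (min (d.getD t k) k)).items, r.2 < k + 1 := by
        intro r hr
        rw [hitems] at hr
        rcases List.mem_append.mp hr with h | h
        · exact lt_trans (hlt r h) (by omega)
        · simp only [List.mem_singleton] at h; subst h; omega
      rw [ih (k + 1) _ hnd' hlt', hitems, hkeys, pvFstOcc, if_neg hm]
      simp

-- B's whole computation, rewritten to the common closed form
theorem pvAlt_eq (data : List (List (String × List String))) :
    build_phoneme_index_alt data
      = ("<SIL>", (0 : Int))
          :: (PySem.List.enumerate (PySem.Set.ofList (data.flatMap (fun sample =>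
                (((PySem.Dict.mk sample).get? "phonemes").getD []).filter pvPred))) 10).map
              (fun q => (q.2, q.1)) := by
  unfold build_phoneme_index_alt
  dsimp only
  rw [show (fun p => !(PySem.Str.startswith p "<LANG:") && !(pvSpecialTokens.contains p)) = pvPred from rfl]
  have hitems := pvMinFold (data.flatMap (fun sample =>
      (((PySem.Dict.mk sample).get? "phonemes").getD []).filter pvPred)) 0 PySem.Dict.empty
    (by simp [PySem.Dict.keys_empty]) (by simp [PySem.Dict.empty])
  rw [show PySem.Dict.empty.items = ([] : List (String × Int)) from rfl,
    show PySem.Dict.empty.keys = ([] : List String) from rfl, List.nil_append] at hitems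
  rw [hitems]
  rw [PySem.List.sorted_eq_self_of_pairwise _ _ (pvFstOcc_pairwise _ 0 _)]
  have hfst := pvFstOcc_map_fst (data.flatMap (fun sample =>
      (((PySem.Dict.mk sample).get? "phonemes").getD []).filter pvPred)) 0 []
  rw [PySem.Set.update_nil_left] at hfst
  simp only [List.nil_append] at hfst
  rw [hfst]

-- ===== VERDICT (by name: the statement is the Claim_ definition above) =====
theorem build_phoneme_index_spec : Claim_equal_build_phoneme_index := by
  intro data _ _
  show build_phoneme_index data = build_phoneme_index_alt data
  unfold build_phoneme_index
  rw [show (pvSpecialTokens, (10 : Int)) = pvState [] from by decide]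
  rw [pvState_outer, PySem.Set.update_nil_left, pvAlt_eq]
  rfl
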